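-- pv_equiv track=rewrite | github.com/anatulea/codesignal_challenges | problems.py | alternatingSort
-- ===== SOURCE A (Python) =====
-- def alternatingSort(a):
--     c,l=0,a[0]
--     while c!=(len(a)-1)//2:
--         c=-c if c<0 else -c-1
--         if a[c]<=l:
--             return False
--         l=a[c]
--     return True
-- ===== SOURCE B (Python) =====
-- def alternatingSort(a):
--     n = len(a)
--     t = (n - 1) // 2
--     front = a[:t + 1]
--     back = a[n - t:][::-1]
--     return all(x < y for x, y in zip(front, back)) and all(y < x for y, x in zip(back, front[1:]))
-- ===== Notes on version B (the rewrite author's own statement) =====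
-- stated objective: alternative
-- what changed: Replaces A's fused sign-flipping while-loop (index c alternately jumping to the back and the front with a running-last comparison and early exit) by a slice-and-zip formulation: split the list into the front slice and the reversed back slice, then check the two comparison families (front[i] < back[i] and back[i] < front[i+1]) as two separate zip/all passes.
import Mathlib
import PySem

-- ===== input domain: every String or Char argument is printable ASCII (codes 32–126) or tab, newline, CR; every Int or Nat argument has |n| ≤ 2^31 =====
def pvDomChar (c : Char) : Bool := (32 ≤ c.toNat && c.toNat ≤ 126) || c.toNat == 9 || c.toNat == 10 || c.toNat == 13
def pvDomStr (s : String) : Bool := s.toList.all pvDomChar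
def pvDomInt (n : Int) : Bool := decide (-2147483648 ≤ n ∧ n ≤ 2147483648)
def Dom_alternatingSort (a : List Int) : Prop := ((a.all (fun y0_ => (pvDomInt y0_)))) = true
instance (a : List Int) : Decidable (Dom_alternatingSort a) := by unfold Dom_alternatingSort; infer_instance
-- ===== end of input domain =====

-- B replaces A's fused sign-flipping while-scan by a slice-and-zip formulation: the front
-- slice and the reversed back slice are compared by two independent zip/all passes.

-- ===== PORT A =====
-- A's while-loop as fuel recursion over the same state (c, l); the guard c = t exits within
-- 2*t steps, so fuel 2*t+1 is always enough and the fuel-0 / index-error branches never fire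
-- on inputs where the Python returns.
def altLoopA (a : List Int) (t : Int) : Nat → Int → Int → Bool
  | 0, _, _ => true
  | fuel + 1, c, l =>
    if c = t then true
    else
      let c' := if c < 0 then -c else -c - 1
      match PySem.List.pyGet? a c' with
      | none => false
      | some v => if v ≤ l then false else altLoopA a t fuel c' v

def alternatingSort (a : List Int) : Bool :=
  match PySem.List.pyGet? a 0 with
  | none => false   -- Python raises IndexError here (empty input); excluded by Pre_
  | some l =>
    altLoopA a (PySem.Int.floordiv ((a.length : Int) - 1) 2) (2 * ((a.length - 1) / 2) + 1) 0 l

-- ===== PORT B =====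
-- back = a[n - t:][::-1]; [::-1] is reversal (PySem.List.slice?_none_none_neg_one), ported as .reverse
def alternatingSort_alt (a : List Int) : Bool :=
  let n : Int := (a.length : Int)
  let t : Int := PySem.Int.floordiv (n - 1) 2
  let front := PySem.List.slice a none (some (t + 1))
  let back := (PySem.List.slice a (some (n - t)) none).reverse
  ((front.zip back).all fun p => decide (p.1 < p.2)) &&
  (((back.zip (PySem.List.slice front (some 1) none))).all fun p => decide (p.1 < p.2))

-- ===== PRECONDITION & SPEC =====
-- Pre_ excludes only the empty list, on which A raises IndexError at its first subscript.
def Pre_alternatingSort (a : List Int) : Prop := a ≠ []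
instance (a : List Int) : Decidable (Pre_alternatingSort a) := by unfold Pre_alternatingSort; infer_instance
def pvWitness_alternatingSort : List Int := [1, 5, 2, 4, 3]

def Spec_alternatingSort (a : List Int) (out : Bool) : Prop := out = alternatingSort_alt a
instance (a : List Int) (out : Bool) : Decidable (Spec_alternatingSort a out) := by unfold Spec_alternatingSort; infer_instance

-- ===== CLAIM (what is proved, stated in full; the proofs are below) =====
def Claim_equal_alternatingSort : Prop := ∀ (a : List Int), Dom_alternatingSort a → Pre_alternatingSort a → Spec_alternatingSort a (alternatingSort a)

-- ===== LEMMAS AND PROOFS =====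

-- adjacent-pair strict-increase check of a list (proof-side characterisation of A's scan)
def pairsIncr : List Int → Bool
  | [] => true
  | [_] => true
  | x :: y :: rest => (decide (x < y)) && pairsIncr (y :: rest)

lemma getElem?_eq_some_getD {xs : List Int} {m : Nat} (h : m < xs.length) :
    xs[m]? = some (xs.getD m 0) := by
  simp [List.getD_eq_getElem?_getD, List.getElem?_eq_getElem h]

-- one unfolding step of A's loop
lemma altLoopA_succ (a : List Int) (t : Int) (fuel : Nat) (c l : Int) :
    altLoopA a t (fuel + 1) c l =
      (if c = t then true
       else
         match PySem.List.pyGet? a (if c < 0 then -c else -c - 1) with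
         | none => false
         | some v => if v ≤ l then false
                     else altLoopA a t fuel (if c < 0 then -c else -c - 1) v) := rfl

-- the loop of A, started at nonnegative c = i with i ≤ t, equals the adjacent-pair check
-- of the rest of the visited sequence
lemma loopA_eq (a : List Int) (t : Nat) (ht : t = (a.length - 1) / 2) (h1 : 1 ≤ a.length) :
    ∀ (k i : Nat), k = t - i → i ≤ t → ∀ (l : Int),
    altLoopA a (t : Int) (2 * k + 1) (i : Int) l
      = pairsIncr (l :: (List.range' i k).flatMap
          (fun j => [a.getD (a.length - 1 - j) 0, a.getD (j + 1) 0])) := by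
  have htlt : t < a.length := by omega
  intro k
  induction k with
  | zero =>
    intro i hk hi l
    have : i = t := by omega
    subst this
    simp [altLoopA, pairsIncr]
  | succ k ih =>
    intro i hk hi l
    have hilt : i < t := by omega
    have hne : (i : Int) ≠ (t : Int) := by omega
    have hneg : ¬ ((i : Int) < 0) := by omega
    set v := a.getD (a.length - 1 - i) 0 with hvdef
    set w := a.getD (i + 1) 0 with hwdef
    have hv : PySem.List.pyGet? a (-(i : Int) - 1) = some v := by
      rw [show (-(i : Int) - 1) = -(((i + 1 : Nat)) : Int) by push_cast; ring,
        PySem.List.pyGet?_neg_natCast a (i + 1) (by omega) (by omega),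
        (by omega : a.length - (i + 1) = a.length - 1 - i)]
      exact getElem?_eq_some_getD (by omega)
    have hw : PySem.List.pyGet? a (((i + 1 : Nat)) : Int) = some w := by
      rw [PySem.List.pyGet?_natCast]
      exact getElem?_eq_some_getD (by omega)
    have hneg2 : (-(i : Int) - 1) < 0 := by omega
    have hne2 : (-(i : Int) - 1) ≠ (t : Int) := by omega
    have e2 : (-(-(i : Int) - 1)) = ((i + 1 : Nat) : Int) := by push_cast; ring
    have hrec := ih (i + 1) (by omega) (by omega)
    rw [show 2 * (k + 1) + 1 = ((2 * k + 1) + 1) + 1 by ring, altLoopA_succ,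
      if_neg hne, if_neg hneg]
    simp only [hv]
    rw [altLoopA_succ, if_neg hne2, if_pos hneg2]
    simp only [e2, hw, hrec]
    rw [List.range'_succ]
    simp only [List.flatMap_cons, List.cons_append, pairsIncr,
      ← hvdef, ← hwdef]
    by_cases h1v : v ≤ l
    · rw [if_pos h1v]
      simp [show ¬ (l < v) by omega]
    · rw [if_neg h1v]
      by_cases h2v : w ≤ v
      · rw [if_pos h2v]
        simp [show ¬ (v < w) by omega]
      · rw [if_neg h2v]
        simp [show l < v by omega, show v < w by omega]

-- the threaded pairwise check over the visited sequence splits into an all over indices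
lemma pairsIncr_eq_all (a : List Int) (n : Nat) :
    ∀ (k i : Nat), pairsIncr (a.getD i 0 :: (List.range' i k).flatMap
        (fun j => [a.getD (n - 1 - j) 0, a.getD (j + 1) 0]))
      = (List.range' i k).all (fun j =>
          decide (a.getD j 0 < a.getD (n - 1 - j) 0) &&
          decide (a.getD (n - 1 - j) 0 < a.getD (j + 1) 0)) := by
  intro k
  induction k with
  | zero => intro i; simp [pairsIncr]
  | succ k ih =>
    intro i
    rw [List.range'_succ]
    simp only [List.flatMap_cons, List.cons_append, List.nil_append, List.all_cons, pairsIncr]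
    rw [ih (i + 1), Bool.and_assoc]

lemma all_and_split (l : List Nat) (p q : Nat → Bool) :
    l.all (fun x => p x && q x) = (l.all p && l.all q) := by
  induction l with
  | nil => simp
  | cons x xs ih =>
    simp only [List.all_cons, ih]
    cases p x <;> cases q x <;> cases xs.all p <;> cases xs.all q <;> rfl

-- ===== VERDICT (by name: the statement is the Claim_ definition above) =====
theorem alternatingSort_spec : Claim_equal_alternatingSort := by
  intro a _ hpre
  have h1 : 1 ≤ a.length := by
    cases a with
    | nil => exact absurd rfl hpre
    | cons x xs => simp
  set tN : Nat := (a.length - 1) / 2 with htN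
  have htlt : tN < a.length := by omega
  have hcast : PySem.Int.floordiv ((a.length : Int) - 1) 2 = ((tN : Nat) : Int) := by
    rw [(by push_cast [Nat.cast_sub h1]; ring : ((a.length : Int) - 1) = (((a.length - 1 : Nat)) : Int))]
    exact_mod_cast PySem.Int.floordiv_natCast (a.length - 1) 2
  have h0 : PySem.List.pyGet? a 0 = some (a.getD 0 0) := by
    rw [show (0 : Int) = ((0 : Nat) : Int) by rfl, PySem.List.pyGet?_natCast]
    exact getElem?_eq_some_getD (by omega)
  unfold Spec_alternatingSort
  -- A side
  have hA := loopA_eq a tN rfl h1 tN 0 (by omega) (by omega) (a.getD 0 0)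
  push_cast at hA
  have hAside : alternatingSort a = pairsIncr (a.getD 0 0 :: (List.range' 0 tN).flatMap
      (fun j => [a.getD (a.length - 1 - j) 0, a.getD (j + 1) 0])) := by
    unfold alternatingSort
    rw [h0, hcast]
    exact hA
  -- B side: identify the slices
  have hfront : PySem.List.slice a none (some ((tN : Int) + 1)) = a.take (tN + 1) := by
    rw [show ((tN : Int) + 1) = (((tN + 1 : Nat)) : Int) by push_cast; ring,
      PySem.List.slice_to_natCast]
  have hback : PySem.List.slice a (some ((a.length : Int) - (tN : Int))) none
      = a.drop (a.length - tN) := by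
    rw [show ((a.length : Int) - (tN : Int)) = (((a.length - tN : Nat)) : Int) by
        push_cast [Nat.cast_sub (by omega : tN ≤ a.length)]; ring,
      PySem.List.slice_from_natCast]
  have htail : PySem.List.slice (a.take (tN + 1)) (some 1) none = (a.take (tN + 1)).tail :=
    PySem.List.slice_from_one _
  have hBside : alternatingSort_alt a =
      ((((a.take (tN + 1)).zip (a.drop (a.length - tN)).reverse).all fun p => decide (p.1 < p.2)) &&
       ((((a.drop (a.length - tN)).reverse.zip (a.take (tN + 1)).tail)).all fun p => decide (p.1 < p.2))) := by
    unfold alternatingSort_alt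
    simp only [hcast, hfront, hback, htail]
  rw [hAside, hBside, pairsIncr_eq_all a a.length tN 0]
  -- identify the two zips as maps over range tN
  have hlen_take : (a.take (tN + 1)).length = tN + 1 := by simp; omega
  have hlen_back : (a.drop (a.length - tN)).reverse.length = tN := by simp; omega
  have hz1 : (a.take (tN + 1)).zip (a.drop (a.length - tN)).reverse
      = (List.range tN).map (fun j => (a.getD j 0, a.getD (a.length - 1 - j) 0)) := by
    apply List.ext_getElem
    · simp [List.length_zip, hlen_take, hlen_back]
    · intro j hj hj'
      have hjt : j < tN := by simpa [List.length_zip, hlen_take, hlen_back] using hj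
      rw [List.getElem_zip]
      simp only [List.getElem_map, List.getElem_range, Prod.mk.injEq]
      refine ⟨?_, ?_⟩
      · rw [List.getElem_take, List.getD_eq_getElem a 0 (by omega)]
      · rw [List.getElem_reverse, List.getElem_drop,
          List.getD_eq_getElem a 0 (by omega)]
        congr 1
        simp [hlen_back] at *
        omega
  have hz2 : ((a.drop (a.length - tN)).reverse).zip (a.take (tN + 1)).tail
      = (List.range tN).map (fun j => (a.getD (a.length - 1 - j) 0, a.getD (j + 1) 0)) := by
    apply List.ext_getElem
    · simp [List.length_zip, hlen_take, hlen_back]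
    · intro j hj hj'
      have hjt : j < tN := by
        simp [List.length_zip, hlen_take, hlen_back] at hj; omega
      rw [List.getElem_zip]
      simp only [List.getElem_map, List.getElem_range, Prod.mk.injEq]
      refine ⟨?_, ?_⟩
      · rw [List.getElem_reverse, List.getElem_drop,
          List.getD_eq_getElem a 0 (by omega)]
        congr 1
        simp [hlen_back] at *
        omega
      · rw [List.getElem_tail, List.getElem_take, List.getD_eq_getElem a 0 (by omega)]
  rw [hz1, hz2]
  simp only [List.all_map, Function.comp_def]
  rw [show (List.range' 0 tN) = List.range tN by rw [List.range_eq_range'],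
    all_and_split]
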